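-- pv_equiv track=rewrite | github.com/ione-ianni/Aorta-Simulation-Preprocessing-Toolkit | utils/utils_registered.py | _poly_exponent_list_3d
-- ===== SOURCE A (Python) =====
-- def _poly_exponent_list_3d(order):
--     """Return list of exponent triplets (i,j,k) for 3D polynomial up to given total order."""
--     exps = []
--     for total in range(order+1):
--         for i in range(total+1):
--             for j in range(total - i + 1):
--                 k = total - i - j
--                 exps.append((i, j, k))
--     return exps
-- ===== SOURCE B (Python) =====
-- def _poly_exponent_list_3d(order):
--     """Return list of exponent triplets (i,j,k) for 3D polynomial up to given total order."""
--     # closed-form tetrahedral count, then stream triplets with a successor function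
--     n = max((order + 1) * (order + 2) * (order + 3) // 6, 0)
--     out = []
--     i = j = k = 0
--     for _ in range(n):
--         out.append((i, j, k))
--         if k > 0:
--             j, k = j + 1, k - 1
--         elif j > 0:
--             i, j, k = i + 1, 0, j - 1
--         else:
--             i, j, k = 0, 0, i + 1
--     return out
-- ===== Notes on version B (the rewrite author's own statement) =====
-- stated objective: alternative
-- what changed: Replaces A's triangular triple loop over (total, i, j) with a closed-form tetrahedral count (order+1)(order+2)(order+3)//6 and a single loop that streams the triplets via a constant-time successor function on (i, j, k).
import Mathlib
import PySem

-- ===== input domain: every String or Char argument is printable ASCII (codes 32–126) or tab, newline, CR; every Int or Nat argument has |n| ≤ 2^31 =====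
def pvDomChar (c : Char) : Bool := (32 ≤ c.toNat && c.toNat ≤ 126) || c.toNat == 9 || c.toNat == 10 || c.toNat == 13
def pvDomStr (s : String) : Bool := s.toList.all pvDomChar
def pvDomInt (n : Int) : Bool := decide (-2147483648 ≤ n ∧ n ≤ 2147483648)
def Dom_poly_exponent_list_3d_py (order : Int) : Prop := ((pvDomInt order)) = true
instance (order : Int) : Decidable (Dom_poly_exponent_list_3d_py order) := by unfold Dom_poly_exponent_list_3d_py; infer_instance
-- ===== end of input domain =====

-- B replaces A's triangular triple loop by a closed-form tetrahedral count plus a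
-- successor-function stream of triplets (alternative algorithm; not claimed faster).


-- ===== PORT A =====
-- A's three nested 'for … append' loops, emitted in traversal order (the append-only
-- accumulator of the Python loop is exactly the concatenation of the rows in loop order).
def poly_exponent_list_3d_py (order : Int) : List (Int × Int × Int) :=
  (PySem.List.pyRange 0 (order + 1) 1).flatMap (fun total =>
    (PySem.List.pyRange 0 (total + 1) 1).flatMap (fun i =>
      (PySem.List.pyRange 0 (total - i + 1) 1).map (fun j => (i, j, total - i - j))))

-- ===== PORT B =====
-- the successor function of Source B's loop body (same three branches, same order)
def pvStep : Int × Int × Int → Int × Int × Int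
  | (i, j, k) =>
    if 0 < k then (i, j + 1, k - 1)
    else if 0 < j then (i + 1, 0, j - 1)
    else (0, 0, i + 1)

-- Source B's 'for _ in range(n): out.append(cur); cur = step cur', as a tail recursion on the
-- loop counter (new element consed onto the accumulator, one final reverse)
def pvGenAux : Nat → (Int × Int × Int) → List (Int × Int × Int) → List (Int × Int × Int)
  | 0, _, acc => acc
  | m + 1, c, acc => pvGenAux m (pvStep c) (c :: acc)

def poly_exponent_list_3d_py_alt (order : Int) : List (Int × Int × Int) :=
  (pvGenAux
    (max (PySem.Int.floordiv ((order + 1) * (order + 2) * (order + 3)) 6) 0).toNat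
    (0, 0, 0) []).reverse

-- ===== PRECONDITION & SPEC =====
def Spec_poly_exponent_list_3d_py (order : Int) (out : List (Int × Int × Int)) : Prop := out = poly_exponent_list_3d_py_alt order
instance (order : Int) (out : List (Int × Int × Int)) : Decidable (Spec_poly_exponent_list_3d_py order out) := by unfold Spec_poly_exponent_list_3d_py; infer_instance

-- ===== CLAIM (what is proved, stated in full; the proofs are below) =====
def Claim_equal_poly_exponent_list_3d_py : Prop := ∀ (order : Int), Dom_poly_exponent_list_3d_py order → Spec_poly_exponent_list_3d_py order (poly_exponent_list_3d_py order)

-- ===== LEMMAS AND PROOFS =====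

-- proof-side reference form of B's loop (front-to-back)
def pvGen : Nat → (Int × Int × Int) → List (Int × Int × Int)
  | 0, _ => []
  | m + 1, c => c :: pvGen m (pvStep c)

def pvIter (n : Nat) (c : Int × Int × Int) : Int × Int × Int := pvStep^[n] c

-- row/shell sizes without division: pvCnt r = (r+1)+r+…+1, pvTet m = Σ_{t<m} pvCnt t
def pvCnt : Nat → Nat
  | 0 => 1
  | r + 1 => (r + 2) + pvCnt r

def pvTet : Nat → Nat
  | 0 => 0
  | m + 1 => pvTet m + pvCnt m

-- the triangle of exponents of total degree t, in A's (i then j) order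
def pvS (t : Nat) : List (Int × Int × Int) :=
  (List.range (t + 1)).flatMap (fun (i : Nat) =>
    (List.range (t + 1 - i)).map (fun (j : Nat) =>
      ((i : Int), (j : Int), (t : Int) - (i : Int) - (j : Int))))

theorem pvFlatMap_congr {α β : Type} {l : List α} {f g : α → List β}
    (h : ∀ a ∈ l, f a = g a) : l.flatMap f = l.flatMap g := by
  simp only [List.flatMap_def]
  exact congrArg List.flatten (List.map_congr_left h)

theorem pvTriple_ext {a b c d e f : Int} (h1 : a = d) (h2 : b = e) (h3 : c = f) :
    ((a, b, c) : Int × Int × Int) = (d, e, f) := by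
  subst h1; subst h2; subst h3; rfl

theorem pvStep_k (i j k : Int) (hk : 0 < k) : pvStep (i, j, k) = (i, j + 1, k - 1) := by
  simp [pvStep, hk]

theorem pvStep_j (i j : Int) (hj : 0 < j) : pvStep (i, j, 0) = (i + 1, 0, j - 1) := by
  simp [pvStep, hj]

theorem pvStep_t (i : Int) : pvStep (i, 0, 0) = (0, 0, i + 1) := by
  simp [pvStep]

theorem pvIter_zero (c : Int × Int × Int) : pvIter 0 c = c := rfl

theorem pvIter_succ (n : Nat) (c : Int × Int × Int) : pvIter (n + 1) c = pvIter n (pvStep c) :=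
  Function.iterate_succ_apply pvStep n c

theorem pvIter_one (c : Int × Int × Int) : pvIter 1 c = pvStep c := rfl

theorem pvIter_add (m n : Nat) (c : Int × Int × Int) :
    pvIter (m + n) c = pvIter m (pvIter n c) :=
  Function.iterate_add_apply pvStep m n c

theorem pvGenAux_eq : ∀ (m : Nat) (c : Int × Int × Int) (acc : List (Int × Int × Int)),
    pvGenAux m c acc = (pvGen m c).reverse ++ acc := by
  intro m
  induction m with
  | zero => intro c acc; simp [pvGenAux, pvGen]
  | succ m ih => intro c acc; simp [pvGenAux, pvGen, ih]

theorem pvGen_add : ∀ (a b : Nat) (c : Int × Int × Int),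
    pvGen (a + b) c = pvGen a c ++ pvGen b (pvIter a c) := by
  intro a
  induction a with
  | zero => intro b c; simp [pvGen, pvIter]
  | succ a ih =>
    intro b c
    have h1 : a + 1 + b = (a + b) + 1 := by omega
    rw [h1]
    show c :: pvGen (a + b) (pvStep c) = (c :: pvGen a (pvStep c)) ++ pvGen b (pvIter (a + 1) c)
    rw [ih, pvIter_succ]
    simp

theorem pvRow_gen : ∀ (k : Nat) (i j : Int),
    pvGen (k + 1) (i, j, (k : Int)) =
      (List.range (k + 1)).map (fun (d : Nat) => (i, j + (d : Int), (k : Int) - (d : Int))) := by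
  intro k
  induction k with
  | zero =>
    intro i j
    simp [pvGen, List.range_succ]
  | succ k ih =>
    intro i j
    have hs : pvStep (i, j, ((k + 1 : Nat) : Int)) = (i, j + 1, (k : Int)) := by
      rw [show ((k + 1 : Nat) : Int) = ((k : Int) + 1) from by push_cast; ring,
        pvStep_k i j ((k : Int) + 1) (by omega)]
      simp
    show (i, j, ((k + 1 : Nat) : Int)) :: pvGen (k + 1) (pvStep (i, j, ((k + 1 : Nat) : Int))) = _
    rw [hs, ih]
    conv_rhs => rw [List.range_succ_eq_map, List.map_cons, List.map_map]
    congr 1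
    · simp
    · apply List.map_congr_left
      intro d _
      simp only [Function.comp_apply]
      exact pvTriple_ext (by push_cast; try omega) (by push_cast; try omega) (by push_cast; try omega)

theorem pvIter_row : ∀ (k : Nat) (i j : Int), 0 ≤ j →
    pvIter (k + 1) (i, j, (k : Int)) =
      if 0 < j + k then (i + 1, 0, j + k - 1) else (0, 0, i + 1) := by
  intro k
  induction k with
  | zero =>
    intro i j hj
    rw [pvIter_one]
    simp only [Nat.cast_zero, add_zero]
    by_cases h : 0 < j
    · rw [pvStep_j i j h, if_pos h]
    · have hj0 : j = 0 := by omega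
      subst hj0
      rw [pvStep_t, if_neg (lt_irrefl (0 : Int))]
  | succ k ih =>
    intro i j hj
    have hs : pvStep (i, j, ((k + 1 : Nat) : Int)) = (i, j + 1, (k : Int)) := by
      rw [show ((k + 1 : Nat) : Int) = ((k : Int) + 1) from by push_cast; ring,
        pvStep_k i j ((k : Int) + 1) (by omega)]
      simp
    rw [pvIter_succ, hs, ih i (j + 1) (by omega)]
    have c1 : (0 : Int) < j + 1 + (k : Int) := by omega
    have c2 : (0 : Int) < j + ((k + 1 : Nat) : Int) := by push_cast; omega
    rw [if_pos c1, if_pos c2]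
    exact pvTriple_ext (by push_cast; try omega) (by push_cast; try omega) (by push_cast; try omega)

theorem pvShell : ∀ (r : Nat) (i : Int),
    pvGen (pvCnt r) (i, 0, (r : Int)) =
      (List.range (r + 1)).flatMap (fun (d : Nat) =>
        (List.range (r + 1 - d)).map (fun (j : Nat) =>
          (i + (d : Int), (j : Int), (r : Int) - (d : Int) - (j : Int))))
    ∧ pvIter (pvCnt r) (i, 0, (r : Int)) = (0, 0, i + r + 1) := by
  intro r
  induction r with
  | zero =>
    intro i
    constructor
    · show pvGen 1 (i, 0, (0 : Int)) = _
      simp [pvGen, List.range_succ]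
    · show pvIter 1 (i, 0, (0 : Int)) = _
      rw [pvIter_one, pvStep_t]
      simp
  | succ r ih =>
    intro i
    have hcnt : pvCnt (r + 1) = (r + 2) + pvCnt r := rfl
    have hrow := pvRow_gen (r + 1) i 0
    have hiter : pvIter (r + 2) (i, 0, ((r + 1 : Nat) : Int)) = (i + 1, 0, (r : Int)) := by
      have c1 : (0 : Int) < 0 + ((r + 1 : Nat) : Int) := by push_cast; omega
      rw [pvIter_row (r + 1) i 0 (le_refl 0), if_pos c1]
      exact pvTriple_ext (by push_cast; try omega) (by push_cast; try omega) (by push_cast; try omega)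
    constructor
    · rw [hcnt, pvGen_add, hrow, hiter, (ih (i + 1)).1]
      conv_rhs => rw [List.range_succ_eq_map, List.flatMap_cons, List.flatMap_map]
      congr 1
      · simp only [Nat.cast_zero, Nat.sub_zero]
        apply List.map_congr_left
        intro j _
        exact pvTriple_ext (by push_cast; try omega) (by push_cast; try omega) (by push_cast; try omega)
      · apply pvFlatMap_congr
        intro d _
        simp only [Function.comp_apply, Nat.succ_eq_add_one]
        rw [show r + 1 + 1 - (d + 1) = r + 1 - d from by omega]
        apply List.map_congr_left
        intro j _
        exact pvTriple_ext (by push_cast; try omega) (by push_cast; try omega) (by push_cast; try omega)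
    · rw [hcnt, Nat.add_comm (r + 2) (pvCnt r), pvIter_add, hiter, (ih (i + 1)).2]
      exact pvTriple_ext (by push_cast; try omega) (by push_cast; try omega) (by push_cast; try omega)

-- pvShell at i = 0 produces exactly the triangle pvS
theorem pvS_from_zero (m : Nat) :
    (List.range (m + 1)).flatMap (fun (d : Nat) =>
      (List.range (m + 1 - d)).map (fun (j : Nat) =>
        ((0 : Int) + (d : Int), (j : Int), (m : Int) - (d : Int) - (j : Int)))) = pvS m := by
  unfold pvS
  apply pvFlatMap_congr
  intro d _
  apply List.map_congr_left
  intro j _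
  exact pvTriple_ext (by push_cast; try omega) (by push_cast; try omega) (by push_cast; try omega)

theorem pvTotals : ∀ (m : Nat),
    pvGen (pvTet m) (0, 0, 0) = (List.range m).flatMap pvS
    ∧ pvIter (pvTet m) (0, 0, 0) = (0, 0, (m : Int)) := by
  intro m
  induction m with
  | zero => exact ⟨by simp [pvTet, pvGen], by simp [pvTet, pvIter_zero]⟩
  | succ m ih =>
    have htet : pvTet (m + 1) = pvTet m + pvCnt m := rfl
    have hshell := pvShell m 0
    constructor
    · rw [htet, pvGen_add, ih.1, ih.2, hshell.1, pvS_from_zero]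
      conv_rhs => rw [List.range_succ]
      rw [List.flatMap_append, List.flatMap_singleton]
    · rw [htet, Nat.add_comm (pvTet m) (pvCnt m), pvIter_add, ih.2, hshell.2]
      exact pvTriple_ext (by push_cast; try omega) (by push_cast; try omega) (by push_cast; try omega)

theorem pvA_shells (order : Int) :
    poly_exponent_list_3d_py order = (List.range (order + 1).toNat).flatMap pvS := by
  unfold poly_exponent_list_3d_py
  rw [PySem.List.pyRange_one, List.flatMap_map]
  rw [show (order + 1 - 0).toNat = (order + 1).toNat from by omega]
  apply pvFlatMap_congr
  intro t ht
  rw [show (0 : Int) + (t : Int) = (t : Int) from by omega]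
  rw [PySem.List.pyRange_one, List.flatMap_map]
  rw [show ((t : Int) + 1 - 0).toNat = t + 1 from by omega]
  unfold pvS
  apply pvFlatMap_congr
  intro i hi
  rw [show (0 : Int) + (i : Int) = (i : Int) from by omega]
  rw [PySem.List.pyRange_one, List.map_map]
  rw [show ((t : Int) - (i : Int) + 1 - 0).toNat = t + 1 - i from by
    have : i < t + 1 := List.mem_range.mp hi
    omega]
  apply List.map_congr_left
  intro j _
  simp only [Function.comp_apply]
  exact pvTriple_ext (by push_cast; try omega) (by push_cast; try omega) (by push_cast; try omega)

theorem pvCnt_two (n : Nat) : (pvCnt n : Int) * 2 = ((n : Int) + 1) * ((n : Int) + 2) := by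
  induction n with
  | zero => simp [pvCnt]
  | succ n ih =>
    have h : pvCnt (n + 1) = (n + 2) + pvCnt n := rfl
    rw [h]
    push_cast
    push_cast at ih
    linear_combination ih

theorem pvTet_six (n : Nat) : (pvTet n : Int) * 6 = (n : Int) * ((n : Int) + 1) * ((n : Int) + 2) := by
  induction n with
  | zero => simp [pvTet]
  | succ n ih =>
    have h : pvTet (n + 1) = pvTet n + pvCnt n := rfl
    rw [h]
    have h2 := pvCnt_two n
    push_cast
    push_cast at ih h2
    linear_combination ih + 3 * h2

theorem pvCount_eq (order : Int) :
    (max (PySem.Int.floordiv ((order + 1) * (order + 2) * (order + 3)) 6) 0).toNat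
      = pvTet (order + 1).toNat := by
  by_cases h : 0 ≤ order + 1
  · have h1 : order + 1 = (((order + 1).toNat : Nat) : Int) := by omega
    have h2 : order + 2 = (((order + 1).toNat : Nat) : Int) + 1 := by omega
    have h3 : order + 3 = (((order + 1).toNat : Nat) : Int) + 2 := by omega
    have hprod : (order + 1) * (order + 2) * (order + 3)
        = (pvTet (order + 1).toNat : Int) * 6 := by
      conv_lhs => rw [h1, h2, h3]
      rw [pvTet_six]
    rw [hprod, PySem.Int.floordiv_eq_ediv_of_pos (by omega),
      Int.mul_ediv_cancel _ (by omega)]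
    rw [max_eq_left (by positivity)]
    simp
  · -- order ≤ -2: the product of three consecutive integers is then nonpositive,
    -- so the floored count clamps to 0, matching A's empty range
    have h0 : (order + 1).toNat = 0 := by omega
    rw [h0]
    have hprod : (order + 1) * (order + 2) * (order + 3) ≤ 0 := by
      by_cases h3 : order + 3 ≤ 0
      · have hp : (0 : Int) < (-(order + 1)) * (-(order + 2)) :=
          mul_pos (by omega) (by omega)
        have h12 : (0 : Int) ≤ (order + 1) * (order + 2) := by nlinarith
        have hm := mul_nonneg h12 (by omega : (0 : Int) ≤ -(order + 3))
        nlinarith [hm]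
      · have he : order = -2 := by omega
        subst he
        norm_num
    have hfd : PySem.Int.floordiv ((order + 1) * (order + 2) * (order + 3)) 6 ≤ 0 := by
      by_contra hc
      push_neg at hc
      have h1 : (1 : Int) ≤ PySem.Int.floordiv ((order + 1) * (order + 2) * (order + 3)) 6 := by
        omega
      rw [PySem.Int.le_floordiv_iff_mul_le (by omega)] at h1
      linarith
    simp only [pvTet]
    omega

-- ===== VERDICT (by name: the statement is the Claim_ definition above) =====
theorem poly_exponent_list_3d_py_spec : Claim_equal_poly_exponent_list_3d_py := by
  intro order _
  unfold Spec_poly_exponent_list_3d_py poly_exponent_list_3d_py_alt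
  rw [pvGenAux_eq, List.append_nil, List.reverse_reverse, pvCount_eq,
    (pvTotals (order + 1).toNat).1, pvA_shells]
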